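-- pv_equiv track=rewrite | github.com/gapalyt/CodingTest_Python | 백준/Silver/2503. 숫자 야구/숫자 야구.py | all_guess
-- ===== SOURCE A (Python) =====
-- def all_guess(guess, question, strike, ball): # 추측, 질문, 스트라이크, 볼
--     guess_str = str(guess)
--     question_str = str(question)
--     guess_strike = guess_ball = 0 # 스트라이크와 볼읙 개수 초기화
--
--     for i in range(3):
--         if guess_str[i] == question_str[i]: # 현재 자릿수의 추측과 질문이 스트라이크인지 확인
--             guess_strike += 1 # 스트라이크라면 증가
--         elif guess_str[i] in question_str: # 현재 자릿수의 추측과 질문이 볼인지 확인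
--             guess_ball += 1 # 볼이면 증가
--
--     return guess_strike == strike and guess_ball == ball # 계산된 스트라이크와 볼의 개수가 일치하는지 확인하고 결과를 반환
-- ===== SOURCE B (Python) =====
-- def all_guess(guess, question, strike, ball):
--     g = str(guess)
--     q = str(question)
--     strikes = sum(g[i] == q[i] for i in range(3))
--     matches = sum(g[i] in q for i in range(3))
--     return strikes == strike and matches - strikes == ball
-- ===== Notes on version B (the rewrite author's own statement) =====
-- stated objective: simpler
-- what changed: Replaces the per-position if/elif strike-or-ball classification with its running accumulators by two independent position counts (positional matches = strikes, guess digits present anywhere in the question = matches) and derives balls as matches - strikes.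
import Mathlib
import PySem

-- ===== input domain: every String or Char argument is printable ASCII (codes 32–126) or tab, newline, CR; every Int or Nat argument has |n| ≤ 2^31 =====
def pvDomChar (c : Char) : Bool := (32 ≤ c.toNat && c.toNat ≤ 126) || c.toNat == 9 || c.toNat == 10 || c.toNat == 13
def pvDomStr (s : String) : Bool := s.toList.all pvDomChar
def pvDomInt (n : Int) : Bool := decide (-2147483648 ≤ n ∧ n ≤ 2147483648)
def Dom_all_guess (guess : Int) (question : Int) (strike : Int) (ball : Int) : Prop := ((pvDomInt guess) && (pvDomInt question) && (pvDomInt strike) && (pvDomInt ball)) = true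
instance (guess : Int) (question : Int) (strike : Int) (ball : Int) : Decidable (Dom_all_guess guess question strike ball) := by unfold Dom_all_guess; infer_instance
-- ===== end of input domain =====

-- B replaces A's per-position if/elif strike/ball classification by two independent counts
-- (strikes = positional matches, balls = digits-present count minus strikes); same result.

-- ===== PORT A =====
def all_guess (guess : Int) (question : Int) (strike : Int) (ball : Int) : Bool :=
  let guess_str := PySem.Int.toChars guess
  let question_str := PySem.Int.toChars question
  let st := (PySem.List.pyRange 0 3 1).foldl (fun (acc : Int × Int) i =>
    match PySem.List.pyGet? guess_str i, PySem.List.pyGet? question_str i with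
    | some gc, some qc =>
        if gc == qc then (acc.1 + 1, acc.2)
        else if question_str.contains gc then (acc.1, acc.2 + 1)
        else acc
    | _, _ => acc  -- IndexError in Python; excluded by Pre_all_guess
    ) (0, 0)
  st.1 == strike && st.2 == ball

-- ===== PORT B =====
def all_guess_alt (guess : Int) (question : Int) (strike : Int) (ball : Int) : Bool :=
  let g := PySem.Int.toChars guess
  let q := PySem.Int.toChars question
  let strikes : Int := ((PySem.List.pyRange 0 3 1).map (fun i =>
      ((PySem.List.pyGet? g i).bind (fun gc => (PySem.List.pyGet? q i).map (fun qc =>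
        if gc == qc then (1 : Int) else 0))).getD 0  -- none = IndexError in Python; excluded by Pre_all_guess
      )).sum
  let hits : Int := ((PySem.List.pyRange 0 3 1).map (fun i =>
      ((PySem.List.pyGet? g i).map (fun gc =>
        if q.contains gc then (1 : Int) else 0)).getD 0  -- none = IndexError; excluded by Pre_all_guess
      )).sum
  strikes == strike && hits - strikes == ball

-- ===== PRECONDITION & SPEC =====
-- Pre_ excludes exactly the inputs where str(guess) or str(question) has fewer than 3
-- characters, on which A raises IndexError at guess_str[i] / question_str[i].
def Pre_all_guess (guess : Int) (question : Int) (strike : Int) (ball : Int) : Prop :=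
  3 ≤ (PySem.Int.toChars guess).length ∧ 3 ≤ (PySem.Int.toChars question).length
instance (guess : Int) (question : Int) (strike : Int) (ball : Int) : Decidable (Pre_all_guess guess question strike ball) := by unfold Pre_all_guess; infer_instance
def pvWitness_all_guess : Int × Int × Int × Int := (123, 321, 1, 2)
def Spec_all_guess (guess : Int) (question : Int) (strike : Int) (ball : Int) (out : Bool) : Prop := out = all_guess_alt guess question strike ball
instance (guess : Int) (question : Int) (strike : Int) (ball : Int) (out : Bool) : Decidable (Spec_all_guess guess question strike ball out) := by unfold Spec_all_guess; infer_instance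

-- ===== CLAIM (what is proved, stated in full; the proofs are below) =====
def Claim_equal_all_guess : Prop := ∀ (guess : Int) (question : Int) (strike : Int) (ball : Int), Dom_all_guess guess question strike ball → Pre_all_guess guess question strike ball → Spec_all_guess guess question strike ball (all_guess guess question strike ball)

-- ===== LEMMAS AND PROOFS =====

-- the core identity on the character lists: A's fold state equals (strikes, hits - strikes)
set_option maxHeartbeats 1000000 in
lemma all_guess_core (gs qs : List Char) (hg : 3 ≤ gs.length) (hq : 3 ≤ qs.length) :
    ((PySem.List.pyRange 0 3 1).foldl (fun (acc : Int × Int) i =>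
      match PySem.List.pyGet? gs i, PySem.List.pyGet? qs i with
      | some gc, some qc =>
          if gc == qc then (acc.1 + 1, acc.2)
          else if qs.contains gc then (acc.1, acc.2 + 1)
          else acc
      | _, _ => acc) (0, 0))
    = (((PySem.List.pyRange 0 3 1).map (fun i =>
          ((PySem.List.pyGet? gs i).bind (fun gc => (PySem.List.pyGet? qs i).map (fun qc =>
            if gc == qc then (1 : Int) else 0))).getD 0)).sum,
       ((PySem.List.pyRange 0 3 1).map (fun i =>
          ((PySem.List.pyGet? gs i).map (fun gc =>
            if qs.contains gc then (1 : Int) else 0)).getD 0)).sum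
        - ((PySem.List.pyRange 0 3 1).map (fun i =>
          ((PySem.List.pyGet? gs i).bind (fun gc => (PySem.List.pyGet? qs i).map (fun qc =>
            if gc == qc then (1 : Int) else 0))).getD 0)).sum) := by
  obtain ⟨a, b, c, gt, rfl⟩ : ∃ a b c gt, gs = a :: b :: c :: gt := by
    rcases gs with _ | ⟨a, _ | ⟨b, _ | ⟨c, gt⟩⟩⟩ <;> simp_all
  obtain ⟨x, y, z, qt, rfl⟩ : ∃ x y z qt, qs = x :: y :: z :: qt := by
    rcases qs with _ | ⟨x, _ | ⟨y, _ | ⟨z, qt⟩⟩⟩ <;> simp_all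
  clear hg hq
  have e1 : (1:Int) = ((1:Nat):Int) := by norm_num
  have e2 : (2:Int) = ((2:Nat):Int) := by norm_num
  rw [show PySem.List.pyRange 0 3 1 = [0, 1, 2] by decide]
  simp only [List.foldl_cons, List.foldl_nil, List.map_cons, List.map_nil, List.sum_cons,
    List.sum_nil, e1, e2, PySem.List.pyGet?_zero_cons, PySem.List.pyGet?_natCast,
    List.getElem?_cons_succ, List.getElem?_cons_zero, Option.bind_some, Option.map_some,
    Option.getD_some]
  by_cases h1 : a = x <;> by_cases h2 : b = y <;> by_cases h3 : c = z <;>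
    by_cases m1 : (x :: y :: z :: qt).contains a = true <;>
    by_cases m2 : (x :: y :: z :: qt).contains b = true <;>
    by_cases m3 : (x :: y :: z :: qt).contains c = true <;>
    simp only [h1, h2, h3, m1, m2, m3, beq_self_eq_true, if_true, if_false,
      beq_iff_eq, List.contains_cons, Bool.true_or, Bool.or_true] <;>
    simp_all

-- lift the core identity to the full Bool expressions of the two ports
lemma all_guess_wrap (gs qs : List Char) (strike ball : Int)
    (hg : 3 ≤ gs.length) (hq : 3 ≤ qs.length) :
    (let st := (PySem.List.pyRange 0 3 1).foldl (fun (acc : Int × Int) i =>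
       match PySem.List.pyGet? gs i, PySem.List.pyGet? qs i with
       | some gc, some qc =>
           if gc == qc then (acc.1 + 1, acc.2)
           else if qs.contains gc then (acc.1, acc.2 + 1)
           else acc
       | _, _ => acc) (0, 0)
     st.1 == strike && st.2 == ball)
    = (let strikes : Int := ((PySem.List.pyRange 0 3 1).map (fun i =>
         ((PySem.List.pyGet? gs i).bind (fun gc => (PySem.List.pyGet? qs i).map (fun qc =>
           if gc == qc then (1 : Int) else 0))).getD 0)).sum
       let hits : Int := ((PySem.List.pyRange 0 3 1).map (fun i =>
         ((PySem.List.pyGet? gs i).map (fun gc =>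
           if qs.contains gc then (1 : Int) else 0)).getD 0)).sum
       strikes == strike && hits - strikes == ball) := by
  simp only [all_guess_core gs qs hg hq]

-- ===== VERDICT (by name: the statement is the Claim_ definition above) =====
theorem all_guess_spec : Claim_equal_all_guess := by
  intro guess question strike ball _ hpre
  obtain ⟨hg, hq⟩ := hpre
  show all_guess guess question strike ball = all_guess_alt guess question strike ball
  exact all_guess_wrap _ _ strike ball hg hq
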